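-- pv_equiv track=rewrite | github.com/pkboom/python_tips | 8_me.py | is_blocking
-- ===== SOURCE A (Python) =====
-- def in_forest(lines, xp, yp, direction, count):
--     if direction == "left":
--         position = yp - 1 * count
--         return position, position >= 0
--     elif direction == "right":
--         position = yp + 1 * count
--         return (
--             position,
--             position < len(lines[0]),
--         )
--     elif direction == "up":
--         position = xp - 1 * count
--         return position, position >= 0
--     else:
--         position = xp + 1 * count
--         return (
--             position,
--             position < len(lines),
--         )
--
-- def get_value(lines, xp, yp, direction, position):
--     if direction == "left":
--         return lines[xp][position]
--     elif direction == "right":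
--         return lines[xp][position]
--     elif direction == "up":
--         return lines[position][yp]
--     else:
--         return lines[position][yp]
--
-- def is_blocking(lines, yv, yp, xv, xp):
--     for direction in ["left", "right", "up", "down"]:
--         c = 1
--
--         while True:
--             position, inside_forest = in_forest(lines, xp, yp, direction, c)
--
--             if not inside_forest:
--                 return False
--
--             value = get_value(lines, xp, yp, direction, position)
--
--             if value >= yv:
--                 break
--
--             c += 1
--
--     return True
-- ===== SOURCE B (Python) =====
-- def is_blocking(lines, yv, yp, xv, xp):
--     if yp <= 0 or xp <= 0:
--         return False  # the left or up ray is empty: nothing encloses the tree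
--     row = lines[xp]
--     column = [line[yp] for line in lines]
--     rays = [row[:yp], row[yp + 1:], column[:xp], column[xp + 1:]]
--     return all(any(v >= yv for v in ray) for ray in rays)
-- ===== Notes on version B (the rewrite author's own statement) =====
-- stated objective: simpler
-- what changed: B drops the in_forest/get_value direction-dispatch helpers and A's counter-stepping while loops: after a trivial empty-ray early-out it builds the four rays directly (row[:yp], row[yp+1:], column[:xp], column[xp+1:]) and returns all(any(v >= yv ...)).
-- outside the precondition, e.g. on is_blocking(['bbb', 'bbb', 'bbb', 'a'], 'b', 1, 'x', 1): A returns True, B raises IndexError; on is_blocking(['bb', 'bab', 'bb'], 'b', 1, 'x', 1): A returns False, B returns True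
import Mathlib
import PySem

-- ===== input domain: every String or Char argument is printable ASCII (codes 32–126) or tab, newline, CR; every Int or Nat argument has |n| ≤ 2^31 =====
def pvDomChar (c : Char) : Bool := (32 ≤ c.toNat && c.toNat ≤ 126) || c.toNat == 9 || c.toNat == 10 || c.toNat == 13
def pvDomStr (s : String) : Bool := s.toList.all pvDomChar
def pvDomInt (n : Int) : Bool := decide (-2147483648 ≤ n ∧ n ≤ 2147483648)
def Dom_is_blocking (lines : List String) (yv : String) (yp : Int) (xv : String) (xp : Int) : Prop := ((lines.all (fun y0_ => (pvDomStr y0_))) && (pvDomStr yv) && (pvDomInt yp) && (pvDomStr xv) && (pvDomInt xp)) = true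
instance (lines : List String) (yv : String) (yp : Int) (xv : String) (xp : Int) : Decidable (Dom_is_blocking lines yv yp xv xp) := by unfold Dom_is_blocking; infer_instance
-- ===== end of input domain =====

-- B replaces A's direction-dispatch helpers and counter-stepping while loops by building the
-- four rays (row slices / column prefix and suffix) and testing each with any — simpler decomposition.

-- B replaces A's direction-dispatch helpers (in_forest/get_value) and counter-stepping while
-- loops by building the four rays (row slices, column prefix/suffix) and testing each with any
-- — a simpler build-then-test decomposition ('objective': simpler; not claimed faster).

-- ===== PORT A =====
-- in_forest(lines, xp, yp, direction, count); len(lines[0]) is ported with a default ""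
-- that is only reached where Python A would already have raised (outside Pre_).
def pvInForest (lines : List String) (xp yp : Int) (direction : String) (count : Int) : Int × Bool :=
  if direction = "left" then
    let position := yp - 1 * count
    (position, decide (position ≥ 0))
  else if direction = "right" then
    let position := yp + 1 * count
    (position, decide (position < ((((PySem.List.pyGet? lines 0).getD "").toList.length : Int))))
  else if direction = "up" then
    let position := xp - 1 * count
    (position, decide (position ≥ 0))
  else
    let position := xp + 1 * count
    (position, decide (position < (lines.length : Int)))

def pvGetValue (lines : List String) (xp yp : Int) (direction : String) (position : Int) : Option Char :=
  if direction = "left" then (PySem.List.pyGet? lines xp).bind (fun r => PySem.Str.pyGet? r position)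
  else if direction = "right" then (PySem.List.pyGet? lines xp).bind (fun r => PySem.Str.pyGet? r position)
  else if direction = "up" then (PySem.List.pyGet? lines position).bind (fun r => PySem.Str.pyGet? r yp)
  else (PySem.List.pyGet? lines position).bind (fun r => PySem.Str.pyGet? r yp)

def pvLoopA (lines : List String) (yv : String) (yp xp : Int) (direction : String) :
    Int → Nat → Bool
  | _, 0 => false
  | c, fuel + 1 =>
    let pi := pvInForest lines xp yp direction c
    if !pi.2 then false
    else
      let value := (pvGetValue lines xp yp direction pi.1).getD ' '
      if !decide (String.ofList [value] < yv) then true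
      else pvLoopA lines yv yp xp direction (c + 1) fuel

-- the 'while True' loop of A for one direction: true = break (blocked), false = 'return False';
-- value access via pyGet? (none = IndexError, outside Pre_); fuel only makes the loop total —
-- under Pre_ it is never exhausted (proved below).
def pvFuel (lines : List String) (yp xp : Int) : Nat :=
  lines.length + ((lines.headD "").toList.length) + yp.natAbs + xp.natAbs + 2

def is_blocking (lines : List String) (yv : String) (yp : Int) (xv : String) (xp : Int) : Bool :=
  ["left", "right", "up", "down"].all
    (fun direction => pvLoopA lines yv yp xp direction 1 (pvFuel lines yp xp))

-- ===== PORT B =====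
def is_blocking_alt (lines : List String) (yv : String) (yp : Int) (xv : String) (xp : Int) : Bool :=
  if decide (yp ≤ 0) || decide (xp ≤ 0) then
    false
  else
    let row := ((PySem.List.pyGet? lines xp).getD "").toList
    let column := lines.map (fun line => (PySem.Str.pyGet? line yp).getD ' ')
    let rays := [PySem.List.slice row none (some yp), PySem.List.slice row (some (yp + 1)) none,
                 PySem.List.slice column none (some xp), PySem.List.slice column (some (xp + 1)) none]
    rays.all (fun ray => ray.any (fun v => !decide (String.ofList [v] < yv)))

-- ===== PRECONDITION & SPEC =====
-- Pre_ covers A's natural domain: the regions where A's first out-of-range step returns False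
-- before any risky indexing (yp ≤ 0; xp = 0 with yp inside row 0; negative in-bounds xp, whose
-- wrapped row is long enough that the left/right scans stay in range before the instant 'up'
-- exit), together with grids whose
-- tree column exists in every row and whose row xp has the length A's right-hand bound
-- len(lines[0]) assumes. Excluded are inputs on which A returns a value only via Python's
-- negative-index wraparound or via a lucky scan order on a ragged grid — artefacts of A's
-- implementation on which B's natural out-of-grid guard returns its own (equally defensible)
-- value.
def Pre_is_blocking (lines : List String) (yv : String) (yp : Int) (xv : String) (xp : Int) : Prop :=
  yp ≤ 0 ∨
  (xp = 0 ∧ 0 ≤ yp ∧ yp ≤ ((lines.headD "").toList.length : Int)) ∨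
  (-(lines.length : Int) ≤ xp ∧ xp < 0 ∧ 0 < yp ∧
   yp ≤ (((lines.getD ((lines.length : Int) + xp).toNat "").toList.length : Int)) ∧
   (lines.headD "").toList.length ≤ (lines.getD ((lines.length : Int) + xp).toNat "").toList.length) ∨
  (0 ≤ xp ∧ xp < lines.length ∧ 0 ≤ yp ∧
   (∀ s ∈ lines, yp < (s.toList.length : Int)) ∧
   (lines.getD xp.toNat "").toList.length = (lines.headD "").toList.length)
instance (lines : List String) (yv : String) (yp : Int) (xv : String) (xp : Int) : Decidable (Pre_is_blocking lines yv yp xv xp) := by unfold Pre_is_blocking; infer_instance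

def pvWitness_is_blocking : List String × String × Int × String × Int :=
  (["aba", "b_b", "aba"], "b", 1, "x", 1)

def Spec_is_blocking (lines : List String) (yv : String) (yp : Int) (xv : String) (xp : Int) (out : Bool) : Prop := out = is_blocking_alt lines yv yp xv xp
instance (lines : List String) (yv : String) (yp : Int) (xv : String) (xp : Int) (out : Bool) : Decidable (Spec_is_blocking lines yv yp xv xp out) := by unfold Spec_is_blocking; infer_instance

-- ===== CLAIM (what is proved, stated in full; the proofs are below) =====
def Claim_equal_is_blocking : Prop := ∀ (lines : List String) (yv : String) (yp : Int) (xv : String) (xp : Int), Dom_is_blocking lines yv yp xv xp → Pre_is_blocking lines yv yp xv xp → Spec_is_blocking lines yv yp xv xp (is_blocking lines yv yp xv xp)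

-- ===== LEMMAS AND PROOFS =====

theorem left_loop (lines : List String) (yv : String) (yp xp : Int) (c : Int) (fuel : Nat)
    (row : List Char) (hrow : (PySem.List.pyGet? lines xp).map String.toList = some row)
    (hc : 1 ≤ c) (hyp : yp ≤ (row.length : Int))
    (hfuel : (yp - c + 1).toNat ≤ fuel) :
    pvLoopA lines yv yp xp "left" c fuel
      = (row.take (yp - c + 1).toNat).any (fun v => !decide (String.ofList [v] < yv)) := by
  induction fuel generalizing c with
  | zero =>
    have h0 : (yp - c + 1).toNat = 0 := by omega
    simp [pvLoopA, h0]
  | succ fuel ih =>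
    obtain ⟨r, hr, hrl⟩ : ∃ r, PySem.List.pyGet? lines xp = some r ∧ r.toList = row := by
      cases h : PySem.List.pyGet? lines xp with
      | none => simp [h] at hrow
      | some r => simp [h] at hrow; exact ⟨r, rfl, hrow⟩
    by_cases hpos : yp - c < 0
    · have h0 : (yp - c + 1).toNat = 0 := by omega
      simp [pvLoopA, pvInForest, h0]
      omega
    · rw [Int.not_lt] at hpos
      have hlt : yp - c < (row.length : Int) := by omega
      have hget : PySem.Str.pyGet? r (yp - 1 * c) = some row[(yp - c).toNat] := by
        have : PySem.List.pyGet? row (yp - c) = some row[(yp - c).toNat] :=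
          PySem.List.pyGet?_eq_some_getElem row hpos hlt
        simpa [pysem, hrl] using this
      have htn : (yp - c + 1).toNat = (yp - c).toNat + 1 := by omega
      have htake : row.take ((yp - c).toNat + 1)
          = row.take (yp - c).toNat ++ [row[(yp - c).toNat]] := by
        rw [List.take_add_one]
        simp [List.getElem?_eq_getElem (by omega : (yp - c).toNat < row.length)]
      have hin : ¬((!decide (yp - 1 * c ≥ 0)) = true) := by simp; omega
      simp only [pvLoopA, pvInForest, pvGetValue, String.reduceEq, reduceIte]
      simp only [hr, Option.bind_some]
      rw [if_neg hin, hget, Option.getD_some, htn, htake, List.any_append]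
      by_cases hpred : String.ofList [row[(yp - c).toNat]] < yv
      · have hih := ih (c + 1) (by omega) (by omega)
        have harg : yp - (c + 1) + 1 = yp - c := by ring
        rw [harg] at hih
        rw [if_neg (by simp [hpred]), hih]
        have hp : (!decide (String.ofList [row[(yp - c).toNat]] < yv)) = false := by
          simp [hpred]
        simp only [List.any_cons, List.any_nil, hp, Bool.or_false]
      · have hp : (!decide (String.ofList [row[(yp - c).toNat]] < yv)) = true := by
          simp [hpred]
        rw [if_pos hp]
        simp only [List.any_cons, List.any_nil, hp, Bool.or_false, Bool.or_true]

theorem right_loop (lines : List String) (yv : String) (yp xp : Int) (c : Int) (fuel : Nat)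
    (row : List Char) (hrow : (PySem.List.pyGet? lines xp).map String.toList = some row)
    (hlen : ((PySem.List.pyGet? lines 0).getD "").length = row.length)
    (hc : 1 ≤ c) (hyp : 0 ≤ yp)
    (hfuel : ((row.length : Int) - (yp + c) + 1).toNat ≤ fuel) :
    pvLoopA lines yv yp xp "right" c fuel
      = (row.drop (yp + c).toNat).any (fun v => !decide (String.ofList [v] < yv)) := by
  induction fuel generalizing c with
  | zero =>
    have h0 : row.length ≤ (yp + c).toNat := by omega
    simp [pvLoopA, List.drop_eq_nil_of_le h0]
  | succ fuel ih =>
    obtain ⟨r, hr, hrl⟩ : ∃ r, PySem.List.pyGet? lines xp = some r ∧ r.toList = row := by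
      cases h : PySem.List.pyGet? lines xp with
      | none => simp [h] at hrow
      | some r => simp [h] at hrow; exact ⟨r, rfl, hrow⟩
    by_cases hout : (row.length : Int) ≤ yp + c
    · have h0 : row.length ≤ (yp + c).toNat := by omega
      have hin : ¬((!decide (yp + 1 * c < (((PySem.List.pyGet? lines 0).getD "").toList.length : Int))) = false) := by
        simp; omega
      simp only [pvLoopA, pvInForest, pvGetValue, String.reduceEq, reduceIte]
      rw [if_pos (by simpa using hin), List.drop_eq_nil_of_le h0]
      simp
    · have hlt : yp + c < (row.length : Int) := by omega
      have hget : PySem.Str.pyGet? r (yp + 1 * c) = some row[(yp + c).toNat] := by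
        have : PySem.List.pyGet? row (yp + c) = some row[(yp + c).toNat] :=
          PySem.List.pyGet?_eq_some_getElem row (by omega) hlt
        simpa [pysem, hrl] using this
      have hdrop : row.drop (yp + c).toNat
          = row[(yp + c).toNat] :: row.drop ((yp + c).toNat + 1) :=
        (List.getElem_cons_drop (by omega)).symm
      have hin : ¬((!decide (yp + 1 * c < (((PySem.List.pyGet? lines 0).getD "").toList.length : Int))) = true) := by
        simp; omega
      simp only [pvLoopA, pvInForest, pvGetValue, String.reduceEq, reduceIte]
      simp only [hr, Option.bind_some]
      rw [if_neg hin, hget, Option.getD_some, hdrop]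
      by_cases hpred : String.ofList [row[(yp + c).toNat]] < yv
      · have hih := ih (c + 1) (by omega) (by omega)
        have harg : (yp + (c + 1)).toNat = (yp + c).toNat + 1 := by omega
        rw [harg] at hih
        rw [if_neg (by simp [hpred]), hih]
        have hp : (!decide (String.ofList [row[(yp + c).toNat]] < yv)) = false := by
          simp [hpred]
        simp only [List.any_cons, hp, Bool.false_or]
      · have hp : (!decide (String.ofList [row[(yp + c).toNat]] < yv)) = true := by
          simp [hpred]
        rw [if_pos hp]
        simp only [List.any_cons, hp, Bool.true_or]

def pvColumn (lines : List String) (yp : Int) : List Char :=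
  lines.map (fun line => (PySem.Str.pyGet? line yp).getD ' ')

theorem pvColumn_length (lines : List String) (yp : Int) :
    (pvColumn lines yp).length = lines.length := by simp [pvColumn]

theorem pvColumn_getElem (lines : List String) (yp : Int) (n : Nat) (h : n < lines.length) :
    (pvColumn lines yp)[n]'(by simpa [pvColumn_length] using h)
      = (PySem.Str.pyGet? lines[n] yp).getD ' ' := by
  simp [pvColumn]

theorem up_loop (lines : List String) (yv : String) (yp xp : Int) (c : Int) (fuel : Nat)
    (hc : 1 ≤ c) (hxp : xp < (lines.length : Int)) (hyp : 0 ≤ yp)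
    (hrect : ∀ s ∈ lines, yp < (s.toList.length : Int))
    (hfuel : (xp - c + 1).toNat ≤ fuel) :
    pvLoopA lines yv yp xp "up" c fuel
      = ((pvColumn lines yp).take (xp - c + 1).toNat).any
          (fun v => !decide (String.ofList [v] < yv)) := by
  induction fuel generalizing c with
  | zero =>
    have h0 : (xp - c + 1).toNat = 0 := by omega
    simp [pvLoopA, h0]
  | succ fuel ih =>
    by_cases hpos : xp - c < 0
    · have h0 : (xp - c + 1).toNat = 0 := by omega
      simp [pvLoopA, pvInForest, h0]
      omega
    · have hltl : (xp - c).toNat < lines.length := by omega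
      have hcl : (xp - c).toNat < (pvColumn lines yp).length := by
        simpa [pvColumn_length] using hltl
      have hget : (PySem.List.pyGet? lines (xp - 1 * c)).bind (fun r => PySem.Str.pyGet? r yp)
          = some ((pvColumn lines yp)[(xp - c).toNat]'hcl) := by
        have h1 : PySem.List.pyGet? lines (xp - c) = some lines[(xp - c).toNat] :=
          PySem.List.pyGet?_eq_some_getElem lines (by omega) (by omega)
        have hb : yp.toNat < (lines[(xp - c).toNat]).toList.length := by
          have := hrect _ (List.getElem_mem hltl); omega
        have h2 : PySem.List.pyGet? (lines[(xp - c).toNat]).toList yp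
            = some ((lines[(xp - c).toNat]).toList[yp.toNat]'hb) :=
          PySem.List.pyGet?_eq_some_getElem _ hyp (hrect _ (List.getElem_mem hltl))
        have h4 : PySem.Str.pyGet? lines[(xp - c).toNat] yp
            = some ((lines[(xp - c).toNat]).toList[yp.toNat]'hb) := by
          rw [← h2]; simp [pysem]
        rw [pvColumn_getElem lines yp _ hltl, h4]
        simp [one_mul, h1]
        exact h2
      have htn : (xp - c + 1).toNat = (xp - c).toNat + 1 := by omega
      have htake : (pvColumn lines yp).take ((xp - c).toNat + 1)
          = (pvColumn lines yp).take (xp - c).toNat ++ [(pvColumn lines yp)[(xp - c).toNat]'hcl] := by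
        rw [List.take_add_one]
        simp [List.getElem?_eq_getElem hcl]
      have hin : ¬((!decide (xp - 1 * c ≥ 0)) = true) := by simp; omega
      simp only [pvLoopA, pvInForest, pvGetValue, String.reduceEq, reduceIte]
      rw [if_neg hin, hget, Option.getD_some, htn, htake, List.any_append]
      by_cases hpred : String.ofList [(pvColumn lines yp)[(xp - c).toNat]'hcl] < yv
      · have hih := ih (c + 1) (by omega) (by omega)
        have harg : xp - (c + 1) + 1 = xp - c := by ring
        rw [harg] at hih
        rw [if_neg (by simp [hpred]), hih]
        have hp : (!decide (String.ofList [(pvColumn lines yp)[(xp - c).toNat]'hcl] < yv)) = false := by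
          simp [hpred]
        simp only [List.any_cons, List.any_nil, hp, Bool.or_false]
      · have hp : (!decide (String.ofList [(pvColumn lines yp)[(xp - c).toNat]'hcl] < yv)) = true := by
          simp [hpred]
        rw [if_pos hp]
        simp only [List.any_cons, List.any_nil, hp, Bool.or_false, Bool.or_true]

theorem down_loop (lines : List String) (yv : String) (yp xp : Int) (c : Int) (fuel : Nat)
    (hc : 1 ≤ c) (hxp : 0 ≤ xp) (hyp : 0 ≤ yp)
    (hrect : ∀ s ∈ lines, yp < (s.toList.length : Int))
    (hfuel : ((lines.length : Int) - (xp + c) + 1).toNat ≤ fuel) :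
    pvLoopA lines yv yp xp "down" c fuel
      = ((pvColumn lines yp).drop (xp + c).toNat).any
          (fun v => !decide (String.ofList [v] < yv)) := by
  induction fuel generalizing c with
  | zero =>
    have h0 : (pvColumn lines yp).length ≤ (xp + c).toNat := by
      rw [pvColumn_length]; omega
    rw [List.drop_eq_nil_of_le h0]
    simp [pvLoopA]
  | succ fuel ih =>
    by_cases hout : (lines.length : Int) ≤ xp + c
    · have h0 : (pvColumn lines yp).length ≤ (xp + c).toNat := by
        rw [pvColumn_length]; omega
      simp only [pvLoopA, pvInForest, pvGetValue, String.reduceEq, reduceIte]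
      rw [if_pos (by simp; omega), List.drop_eq_nil_of_le h0]
      simp
    · have hltl : (xp + c).toNat < lines.length := by omega
      have hcl : (xp + c).toNat < (pvColumn lines yp).length := by
        simpa [pvColumn_length] using hltl
      have hget : (PySem.List.pyGet? lines (xp + 1 * c)).bind (fun r => PySem.Str.pyGet? r yp)
          = some ((pvColumn lines yp)[(xp + c).toNat]'hcl) := by
        have h1 : PySem.List.pyGet? lines (xp + c) = some lines[(xp + c).toNat] :=
          PySem.List.pyGet?_eq_some_getElem lines (by omega) (by omega)
        have hb : yp.toNat < (lines[(xp + c).toNat]).toList.length := by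
          have := hrect _ (List.getElem_mem hltl); omega
        have h2 : PySem.List.pyGet? (lines[(xp + c).toNat]).toList yp
            = some ((lines[(xp + c).toNat]).toList[yp.toNat]'hb) :=
          PySem.List.pyGet?_eq_some_getElem _ hyp (hrect _ (List.getElem_mem hltl))
        have h4 : PySem.Str.pyGet? lines[(xp + c).toNat] yp
            = some ((lines[(xp + c).toNat]).toList[yp.toNat]'hb) := by
          rw [← h2]; simp [pysem]
        rw [pvColumn_getElem lines yp _ hltl, h4]
        simp [one_mul, h1]
        exact h2
      have hdrop : (pvColumn lines yp).drop (xp + c).toNat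
          = ((pvColumn lines yp)[(xp + c).toNat]'hcl) :: (pvColumn lines yp).drop ((xp + c).toNat + 1) :=
        (List.getElem_cons_drop hcl).symm
      have hin : ¬((!decide (xp + 1 * c < (lines.length : Int))) = true) := by simp; omega
      simp only [pvLoopA, pvInForest, pvGetValue, String.reduceEq, reduceIte]
      rw [if_neg hin, hget, Option.getD_some, hdrop]
      by_cases hpred : String.ofList [(pvColumn lines yp)[(xp + c).toNat]'hcl] < yv
      · have hih := ih (c + 1) (by omega) (by omega)
        have harg : (xp + (c + 1)).toNat = (xp + c).toNat + 1 := by omega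
        rw [harg] at hih
        rw [if_neg (by simp [hpred]), hih]
        have hp : (!decide (String.ofList [(pvColumn lines yp)[(xp + c).toNat]'hcl] < yv)) = false := by
          simp [hpred]
        simp only [List.any_cons, hp, Bool.false_or]
      · have hp : (!decide (String.ofList [(pvColumn lines yp)[(xp + c).toNat]'hcl] < yv)) = true := by
          simp [hpred]
        rw [if_pos hp]
        simp only [List.any_cons, hp, Bool.true_or]

theorem pv_main (lines : List String) (yv : String) (yp : Int) (xv : String) (xp : Int)
    (hxppos : 0 < xp) (hxpl : xp < (lines.length : Int)) (hyppos : 0 < yp)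
    (hcols : ∀ s ∈ lines, yp < (s.toList.length : Int))
    (hlen0 : (lines.getD xp.toNat "").toList.length = (lines.headD "").toList.length) :
    is_blocking lines yv yp xv xp = is_blocking_alt lines yv yp xv xp := by
  have hxp0 : 0 ≤ xp := le_of_lt hxppos
  have hyp0 : 0 ≤ yp := le_of_lt hyppos
  have hxl : xp.toNat < lines.length := by omega
  have hne : lines ≠ [] := by
    intro h
    subst h
    simp at hxpl
    omega
  have hrowget : PySem.List.pyGet? lines xp = some lines[xp.toNat] :=
    PySem.List.pyGet?_eq_some_getElem lines hxp0 hxpl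
  have hrow : (PySem.List.pyGet? lines xp).map String.toList = some (lines[xp.toNat]).toList := by
    rw [hrowget]; rfl
  have hgetd : lines.getD xp.toNat "" = lines[xp.toNat] := by
    rw [List.getD_eq_getElem?_getD, List.getElem?_eq_getElem hxl]
    rfl
  have hrlen : (lines[xp.toNat]).toList.length = (lines.headD "").toList.length := by
    rw [← hgetd]; exact hlen0
  have h0l : 0 < lines.length := by omega
  have h0get : PySem.List.pyGet? lines 0 = some lines[0] :=
    PySem.List.pyGet?_eq_some_getElem lines (by omega) (by exact_mod_cast h0l)
  have hhead : lines.headD "" = lines[0] := by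
    cases lines with
    | nil => exact absurd rfl hne
    | cons a l => rfl
  have hlen : ((PySem.List.pyGet? lines 0).getD "").length = (lines[xp.toNat]).toList.length := by
    rw [h0get, Option.getD_some, hrlen, hhead]
    simp
  have hrowle : yp ≤ ((lines[xp.toNat]).toList.length : Int) := by
    have := hcols _ (List.getElem_mem hxl)
    omega
  have hl := left_loop lines yv yp xp 1 (pvFuel lines yp xp) (lines[xp.toNat]).toList hrow
    le_rfl hrowle (by unfold pvFuel; omega)
  have hr := right_loop lines yv yp xp 1 (pvFuel lines yp xp) (lines[xp.toNat]).toList hrow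
    hlen le_rfl hyp0 (by unfold pvFuel; omega)
  have hu := up_loop lines yv yp xp 1 (pvFuel lines yp xp) le_rfl hxpl hyp0 hcols
    (by unfold pvFuel; omega)
  have hd := down_loop lines yv yp xp 1 (pvFuel lines yp xp) le_rfl hxp0 hyp0 hcols
    (by unfold pvFuel; omega)
  have e1 : yp - 1 + 1 = yp := by ring
  have e2 : xp - 1 + 1 = xp := by ring
  rw [e1] at hl; rw [e2] at hu
  have hg : (decide (yp ≤ 0) || decide (xp ≤ 0)) = false := by
    simp only [Bool.or_eq_false_iff, decide_eq_false_iff_not]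
    omega
  unfold is_blocking is_blocking_alt
  rw [hg]
  simp only [Bool.false_eq_true, if_false]
  simp only [List.all_cons, List.all_nil, Bool.and_true]
  rw [hl, hr, hu, hd, hrowget, Option.getD_some]
  rw [PySem.List.slice_to _ hyp0, PySem.List.slice_from _ (by omega : (0:Int) ≤ yp + 1),
      PySem.List.slice_to _ hxp0, PySem.List.slice_from _ (by omega : (0:Int) ≤ xp + 1)]
  rfl

theorem pv_A_yp0 (lines : List String) (yv : String) (yp : Int) (xv : String) (xp : Int)
    (h : yp ≤ 0) : is_blocking lines yv yp xv xp = false := by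
  have hf : pvLoopA lines yv yp xp "left" 1 (pvFuel lines yp xp) = false := by
    obtain ⟨k, hk⟩ : ∃ k, pvFuel lines yp xp = k + 1 :=
      ⟨lines.length + ((lines.headD "").toList.length) + yp.natAbs + xp.natAbs + 1, rfl⟩
    rw [hk]
    simp [pvLoopA, pvInForest]
    omega
  unfold is_blocking
  simp [List.all_cons, hf]

theorem pv_A_xp0 (lines : List String) (yv : String) (yp : Int) (xv : String) (xp : Int)
    (hx0 : xp ≤ 0) : is_blocking lines yv yp xv xp = false := by
  have hu : pvLoopA lines yv yp xp "up" 1 (pvFuel lines yp xp) = false := by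
    obtain ⟨k, hk⟩ : ∃ k, pvFuel lines yp xp = k + 1 :=
      ⟨lines.length + ((lines.headD "").toList.length) + yp.natAbs + xp.natAbs + 1, rfl⟩
    rw [hk]
    simp [pvLoopA, pvInForest]
    omega
  unfold is_blocking
  simp [hu]

theorem pv_alt_le (lines : List String) (yv : String) (yp : Int) (xv : String) (xp : Int)
    (h : yp ≤ 0 ∨ xp ≤ 0) : is_blocking_alt lines yv yp xv xp = false := by
  unfold is_blocking_alt
  have hg : (decide (yp ≤ 0) || decide (xp ≤ 0)) = true := by
    rcases h with h | h <;> simp [h]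
  rw [hg]
  rfl

-- ===== VERDICT (by name: the statement is the Claim_ definition above) =====
theorem is_blocking_spec : Claim_equal_is_blocking := by
  intro lines yv yp xv xp _ hpre
  unfold Spec_is_blocking
  by_cases hyp : yp ≤ 0
  · rw [pv_A_yp0 lines yv yp xv xp hyp, pv_alt_le lines yv yp xv xp (Or.inl hyp)]
  · rcases hpre with h | h | h | h
    · omega
    · obtain ⟨hx0, hy0, hyl⟩ := h
      rw [pv_A_xp0 lines yv yp xv xp (le_of_eq hx0),
          pv_alt_le lines yv yp xv xp (Or.inr (le_of_eq hx0))]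
    · obtain ⟨hxl, hxneg, hy0, hyl, hlen⟩ := h
      rw [pv_A_xp0 lines yv yp xv xp (le_of_lt hxneg),
          pv_alt_le lines yv yp xv xp (Or.inr (le_of_lt hxneg))]
    · obtain ⟨hxp0, hxpl, hyp0, hcols, hlen0⟩ := h
      by_cases hx : xp = 0
      · rw [pv_A_xp0 lines yv yp xv xp (le_of_eq hx),
            pv_alt_le lines yv yp xv xp (Or.inr (le_of_eq hx))]
      · exact pv_main lines yv yp xv xp (by omega) hxpl (by omega) hcols hlen0
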